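-- pv_equiv track=rewrite | github.com/mel274/wearhouse-optimizer | calculations/simulation.py | create_sub_route
-- ===== SOURCE A (Python) =====
-- from typing import List, Dict, Any, Tuple, Set
--
-- def create_sub_route(master_route: List[int], active_nodes: Set[int], depot: int = 0) -> List[int]:
--     """
--     Create a sub-route from master route containing only active nodes.
--     Preserves the original sequence from the master route.
--
--     Args:
--         master_route: Original route as list of matrix indices [0, 1, 3, 5, 0]
--         active_nodes: Set of matrix indices that are active on this date
--         depot: Matrix index of depot (usually 0)
--
--     Returns:
--         Sub-route with only active nodes, preserving sequence
--         Always starts and ends with depot: [0, ...active_nodes..., 0]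
--     """
--     if not master_route:
--         return [depot, depot]
--
--     # Filter route to only include active nodes (and depot)
--     sub_route = []
--     for node in master_route:
--         if node == depot or node in active_nodes:
--             sub_route.append(node)
--
--     # Ensure route starts and ends with depot
--     if not sub_route or sub_route[0] != depot:
--         sub_route.insert(0, depot)
--     if not sub_route or sub_route[-1] != depot:
--         sub_route.append(depot)
--
--     # Remove consecutive duplicate depots
--     cleaned = [sub_route[0]]
--     for i in range(1, len(sub_route)):
--         if sub_route[i] != sub_route[i-1]:
--             cleaned.append(sub_route[i])
--
--     return cleaned if len(cleaned) > 1 else [depot, depot]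
-- ===== SOURCE B (Python) =====
-- def create_sub_route(master_route, active_nodes, depot=0):
--     # Single fused pass: filter to active nodes and collapse consecutive
--     # duplicates at the same time, tracking the last kept node.
--     route = [depot]
--     last = depot
--     for node in master_route:
--         if (node == depot or node in active_nodes) and node != last:
--             route.append(node)
--             last = node
--     if last != depot:
--         route.append(depot)
--     return route if len(route) > 1 else [depot, depot]
-- ===== Notes on version B (the rewrite author's own statement) =====
-- stated objective: simpler
-- what changed: Replaced A's three sequential passes (filter, depot end-fixing with insert, then adjacent-duplicate removal over indices) by one fused loop that filters and deduplicates simultaneously while tracking the last kept node.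
import Mathlib
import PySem

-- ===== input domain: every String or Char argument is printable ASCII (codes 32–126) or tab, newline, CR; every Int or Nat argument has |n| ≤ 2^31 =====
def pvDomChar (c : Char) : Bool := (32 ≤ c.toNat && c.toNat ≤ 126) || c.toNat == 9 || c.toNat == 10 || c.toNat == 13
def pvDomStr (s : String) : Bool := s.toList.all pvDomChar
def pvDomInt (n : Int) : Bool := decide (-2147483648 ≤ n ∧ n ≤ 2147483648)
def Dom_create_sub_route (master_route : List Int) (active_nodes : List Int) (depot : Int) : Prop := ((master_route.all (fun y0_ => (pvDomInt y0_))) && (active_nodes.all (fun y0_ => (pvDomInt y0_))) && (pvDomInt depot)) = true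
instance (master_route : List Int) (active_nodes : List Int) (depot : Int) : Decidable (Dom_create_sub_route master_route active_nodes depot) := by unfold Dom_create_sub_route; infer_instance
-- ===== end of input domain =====

-- B fuses A's three passes (filter, depot end-fixing, adjacent-duplicate removal) into one loop; objective: simpler.

-- ===== PORT A =====
-- helper for A's 'cleaned' loop: append s[i] whenever it differs from s[i-1]
def csrCleanA (prev : Int) : List Int → List Int
  | [] => []
  | x :: xs => if x ≠ prev then x :: csrCleanA x xs else csrCleanA prev xs

def create_sub_route (master_route : List Int) (active_nodes : List Int) (depot : Int) : List Int :=
  if master_route = [] then [depot, depot]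
  else
    let sub_route := master_route.foldl
      (fun acc node => if node == depot || active_nodes.contains node then acc ++ [node] else acc) []
    let sub_route := if sub_route = [] ∨ sub_route.head? ≠ some depot then depot :: sub_route else sub_route
    let sub_route := if sub_route = [] ∨ sub_route.getLast? ≠ some depot then sub_route ++ [depot] else sub_route
    let cleaned := match sub_route with
      | [] => []          -- unreachable: sub_route is nonempty here
      | h :: t => h :: csrCleanA h t
    if cleaned.length > 1 then cleaned else [depot, depot]

-- ===== PORT B =====
def create_sub_route_alt (master_route : List Int) (active_nodes : List Int) (depot : Int) : List Int :=
  let st := master_route.foldl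
    (fun (st : List Int × Int) node =>
      if (node == depot || active_nodes.contains node) && node != st.2
      then (st.1 ++ [node], node) else st)
    ([depot], depot)
  let route := if st.2 ≠ depot then st.1 ++ [depot] else st.1
  if route.length > 1 then route else [depot, depot]

-- ===== PRECONDITION & SPEC =====
def Spec_create_sub_route (master_route : List Int) (active_nodes : List Int) (depot : Int) (out : List Int) : Prop := out = create_sub_route_alt master_route active_nodes depot
instance (master_route : List Int) (active_nodes : List Int) (depot : Int) (out : List Int) : Decidable (Spec_create_sub_route master_route active_nodes depot out) := by unfold Spec_create_sub_route; infer_instance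

-- ===== CLAIM (what is proved, stated in full; the proofs are below) =====
def Claim_equal_create_sub_route : Prop := ∀ (master_route : List Int) (active_nodes : List Int) (depot : Int), Dom_create_sub_route master_route active_nodes depot → Spec_create_sub_route master_route active_nodes depot (create_sub_route master_route active_nodes depot)

-- ===== LEMMAS AND PROOFS =====

-- A's filter loop is List.filter
theorem csr_filter_fold (p : Int → Bool) (l acc : List Int) :
    l.foldl (fun acc x => if p x then acc ++ [x] else acc) acc = acc ++ l.filter p := by
  induction l generalizing acc with
  | nil => simp
  | cons x xs ih =>
    by_cases h : p x <;> simp [List.foldl, h, ih]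

-- B's fused loop = filter then csrCleanA, with the last kept node as second component
theorem csr_fold_B (p : Int → Bool) (l : List Int) (r : List Int) (last : Int) :
    l.foldl (fun (st : List Int × Int) node =>
        if p node && node != st.2 then (st.1 ++ [node], node) else st) (r, last)
    = (r ++ csrCleanA last (l.filter p), (csrCleanA last (l.filter p)).getLastD last) := by
  induction l generalizing r last with
  | nil => simp [csrCleanA, List.getLastD]
  | cons x xs ih =>
    rw [List.foldl_cons]
    by_cases hp : p x
    · by_cases hx : x = last
      · rw [show (if (p x && x != (r, last).2) = true then ((r, last).1 ++ [x], x) else (r, last))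
              = (r, last) from by simp [hx]]
        rw [ih, List.filter_cons_of_pos hp, hx,
          show csrCleanA last (last :: xs.filter p) = csrCleanA last (xs.filter p) from by
            simp [csrCleanA]]
      · rw [show (if (p x && x != (r, last).2) = true then ((r, last).1 ++ [x], x) else (r, last))
              = (r ++ [x], x) from by simp [hp, hx]]
        rw [ih, List.filter_cons_of_pos hp,
          show csrCleanA last (x :: xs.filter p) = x :: csrCleanA x (xs.filter p) from by
            simp [csrCleanA, hx]]
        rw [List.append_cons, List.getLastD_cons]
        simp
    · rw [show (if (p x && x != (r, last).2) = true then ((r, last).1 ++ [x], x) else (r, last))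
            = (r, last) from by simp [hp]]
      rw [ih, List.filter_cons_of_neg hp]

-- csrCleanA preserves the (defaulted) last element
theorem csr_clean_getLastD (t : List Int) : ∀ (last : Int),
    (csrCleanA last t).getLastD last = t.getLastD last := by
  induction t with
  | nil => intro last; rfl
  | cons x xs ih =>
    intro last
    by_cases hx : x = last
    · subst hx
      rw [show csrCleanA x (x :: xs) = csrCleanA x xs from by simp [csrCleanA], ih x,
        List.getLastD_cons]
    · rw [show csrCleanA last (x :: xs) = x :: csrCleanA x xs from by simp [csrCleanA, hx],
        List.getLastD_cons, List.getLastD_cons, ih x]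

-- appending a fresh element commutes with csrCleanA
theorem csr_clean_append (t : List Int) : ∀ (last d : Int), t.getLastD last ≠ d →
    csrCleanA last (t ++ [d]) = csrCleanA last t ++ [d] := by
  induction t with
  | nil =>
    intro last d h
    simp only [List.getLastD] at h
    simp [csrCleanA, Ne.symm h]
  | cons x xs ih =>
    intro last d h
    rw [List.getLastD_cons] at h
    by_cases hx : x = last
    · subst hx
      rw [List.cons_append,
        show csrCleanA x (x :: (xs ++ [d])) = csrCleanA x (xs ++ [d]) from by simp [csrCleanA],
        show csrCleanA x (x :: xs) = csrCleanA x xs from by simp [csrCleanA], ih _ _ h]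
    · rw [List.cons_append,
        show csrCleanA last (x :: (xs ++ [d])) = x :: csrCleanA x (xs ++ [d]) from by
          simp [csrCleanA, hx],
        show csrCleanA last (x :: xs) = x :: csrCleanA x xs from by simp [csrCleanA, hx],
        ih _ _ h, List.cons_append]

-- getLast? of a cons, via getLastD
theorem csr_getLast?_cons (a : Int) (l : List Int) : (a :: l).getLast? = some (l.getLastD a) := by
  induction l generalizing a with
  | nil => simp [List.getLastD]
  | cons b t ih => rw [List.getLastD_cons, List.getLast?_cons_cons]; exact ih b

-- A's head-fixing step always yields depot :: t2 with t2 clean-equal to s and the same defaulted last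
theorem csr_headfix (depot : Int) (s : List Int) :
    ∃ t2, (if s = [] ∨ s.head? ≠ some depot then depot :: s else s) = depot :: t2 ∧
      csrCleanA depot t2 = csrCleanA depot s ∧ t2.getLastD depot = s.getLastD depot := by
  cases s with
  | nil => exact ⟨[], by simp, rfl, rfl⟩
  | cons h1 t1 =>
    by_cases hh : h1 = depot
    · subst hh
      exact ⟨t1, by simp, by simp [csrCleanA], by rw [List.getLastD_cons]⟩
    · exact ⟨h1 :: t1, by simp [hh], rfl, rfl⟩

-- ===== VERDICT (by name: the statement is the Claim_ definition above) =====
theorem create_sub_route_spec : Claim_equal_create_sub_route := by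
  intro master active depot _
  unfold Spec_create_sub_route create_sub_route create_sub_route_alt
  rw [csr_fold_B (fun node => node == depot || active.contains node),
    csr_filter_fold (fun node => node == depot || active.contains node)]
  simp only [List.nil_append]
  by_cases hm : master = []
  · subst hm; simp [csrCleanA, List.getLastD]
  · rw [if_neg hm]
    obtain ⟨t2, ht2, hc2, hl2⟩ :=
      csr_headfix depot (master.filter (fun node => node == depot || active.contains node))
    rw [ht2, csr_getLast?_cons, hl2, csr_clean_getLastD]
    set s := master.filter (fun node => node == depot || active.contains node) with hs
    by_cases hL : s.getLastD depot = depot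
    · rw [hL]
      simp only [ne_eq, not_true_eq_false, reduceCtorEq, or_false, if_neg, not_false_eq_true]
      simp [hc2]
    · have happ : csrCleanA depot (t2 ++ [depot]) = csrCleanA depot t2 ++ [depot] :=
        csr_clean_append t2 depot depot (by rw [hl2]; exact hL)
      simp only [ne_eq, hL, not_false_eq_true, Option.some.injEq, or_true, if_pos]
      rw [show depot :: t2 ++ [depot] = depot :: (t2 ++ [depot]) from by simp]
      simp [happ, hc2]
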